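-- pv_equiv track=rewrite | github.com/MegaGnar13/Baekjoon_pc | programers/2022dev1.py | solution
-- ===== SOURCE A (Python) =====
-- def solution(grade):
--
--     answer = 0
--     temp = grade[-1]
--     for i in reversed(grade):
--         if i > temp:
--             answer += (i - temp)
--         else:
--             temp = i
--
--     return answer
-- ===== SOURCE B (Python) =====
-- def solution(grade):
--     n = len(grade)
--     suffmin = [0] * n
--     m = grade[-1]
--     for i in range(n - 1, -1, -1):
--         m = min(m, grade[i])
--         suffmin[i] = m
--     return sum(g - s for g, s in zip(grade, suffmin))
-- ===== Notes on version B (the rewrite author's own statement) =====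
-- stated objective: alternative
-- what changed: B first builds an explicit suffix-minimum table in a right-to-left pass and then sums grade[i]-suffmin[i] in a separate pass, instead of A's single interleaved loop that conditionally accumulates or updates a running minimum.
import Mathlib
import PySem

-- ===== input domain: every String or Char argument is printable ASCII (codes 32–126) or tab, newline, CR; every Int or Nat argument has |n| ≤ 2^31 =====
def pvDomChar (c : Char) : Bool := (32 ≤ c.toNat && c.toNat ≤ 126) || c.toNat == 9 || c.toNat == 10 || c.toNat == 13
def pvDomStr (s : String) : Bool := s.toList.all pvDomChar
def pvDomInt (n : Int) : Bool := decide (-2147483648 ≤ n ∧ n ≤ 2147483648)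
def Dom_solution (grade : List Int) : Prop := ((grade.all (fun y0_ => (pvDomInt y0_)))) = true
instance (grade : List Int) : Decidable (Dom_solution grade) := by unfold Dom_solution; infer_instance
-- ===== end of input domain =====

-- B builds an explicit suffix-minimum table in one pass and sums grade[i] - suffmin[i] in a second pass,
-- instead of A's single interleaved loop; alternative decomposition, same cost. No argument is mutated.

-- ===== PORT A =====
-- answer = 0; temp = grade[-1]; for i in reversed(grade): if i > temp: answer += i - temp else: temp = i
def solution (grade : List Int) : Int :=
  match PySem.List.pyGet? grade (-1) with
  | none => 0  -- unreachable under Pre_solution (IndexError in Python)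
  | some t0 =>
    (grade.reverse.foldl
      (fun (st : Int × Int) i => if i > st.2 then (st.1 + (i - st.2), st.2) else (st.1, i))
      (0, t0)).1

-- ===== PORT B =====
-- m = grade[-1]; for i from n-1 down to 0: m = min(m, grade[i]); suffmin[i] = m  — the loop walks
-- positions right-to-left, so it is the fold over grade.reverse that PREPENDS each new minimum;
-- then sum(g - s for g, s in zip(grade, suffmin)).
def solution_alt (grade : List Int) : Int :=
  match PySem.List.pyGet? grade (-1) with
  | none => 0  -- unreachable under Pre_solution (IndexError in Python)
  | some m0 =>
    let suffmin :=
      (grade.reverse.foldl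
        (fun (st : Int × List Int) g => (min st.1 g, min st.1 g :: st.2)) (m0, [])).2
    (List.zipWith (fun g s => g - s) grade suffmin).foldl (· + ·) 0

-- ===== PRECONDITION & SPEC =====
-- Pre_ excludes only the empty list, on which A (grade[-1]) raises IndexError.
def Pre_solution (grade : List Int) : Prop := grade ≠ []
instance (grade : List Int) : Decidable (Pre_solution grade) := by unfold Pre_solution; infer_instance
def pvWitness_solution : List Int := [3, 1, 4, 1, 5]

def Spec_solution (grade : List Int) (out : Int) : Prop := out = solution_alt grade
instance (grade : List Int) (out : Int) : Decidable (Spec_solution grade out) := by unfold Spec_solution; infer_instance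

-- ===== CLAIM (what is proved, stated in full; the proofs are below) =====
def Claim_equal_solution : Prop := ∀ (grade : List Int), Dom_solution grade → Pre_solution grade → Spec_solution grade (solution grade)

-- ===== LEMMAS AND PROOFS =====

-- reference "excess over running minimum" of a (reversed) list with initial minimum t
def pvExc : List Int → Int → Int
  | [], _ => 0
  | g :: gs, t => (g - min t g) + pvExc gs (min t g)

-- the running minima of a (reversed) list, in processing order
def pvMins : List Int → Int → List Int
  | [], _ => []
  | g :: gs, t => min t g :: pvMins gs (min t g)

theorem pvMins_length (r : List Int) (t : Int) : (pvMins r t).length = r.length := by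
  induction r generalizing t with
  | nil => rfl
  | cons g gs ih => simp [pvMins, ih]

-- A's fold computes pvExc (the accumulator branch adds g - t = g - min t g when g > t, and the
-- else branch contributes 0 = g - min t g while lowering t to min t g).
theorem pvA_fold (r : List Int) (a t : Int) :
    (r.foldl (fun (st : Int × Int) i => if i > st.2 then (st.1 + (i - st.2), st.2) else (st.1, i)) (a, t)).1
      = a + pvExc r t := by
  induction r generalizing a t with
  | nil => simp [pvExc]
  | cons g gs ih =>
    simp only [List.foldl_cons, pvExc]
    by_cases h : g > t
    · have hm : min t g = t := by omega
      simp [h, hm, ih]; ring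
    · have hm : min t g = g := by omega
      simp [h, hm, ih]

-- B's fold builds the running minima, reversed, in front of the initial list.
theorem pvB_fold (r : List Int) (m : Int) (l : List Int) :
    (r.foldl (fun (st : Int × List Int) g => (min st.1 g, min st.1 g :: st.2)) (m, l)).2
      = (pvMins r m).reverse ++ l := by
  induction r generalizing m l with
  | nil => simp [pvMins]
  | cons g gs ih => simp [pvMins, ih]

theorem pvSum_zip_mins (r : List Int) (t : Int) :
    (List.zipWith (fun g s => g - s) r (pvMins r t)).sum = pvExc r t := by
  induction r generalizing t with
  | nil => simp [pvMins, pvExc]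
  | cons g gs ih => simp [pvMins, pvExc, ih]

theorem solution_spec : Claim_equal_solution := by
  intro grade _ _
  unfold Spec_solution solution solution_alt
  cases hg : PySem.List.pyGet? grade (-1) with
  | none => rfl
  | some t0 =>
    simp only
    rw [pvA_fold, pvB_fold]
    have hlen : ((pvMins grade.reverse t0).reverse).length = grade.length := by
      simp [pvMins_length]
    have hfold : ∀ (l : List Int), l.foldl (· + ·) 0 = l.sum := fun l => by
      simpa using (PySem.List.foldl_add (l := l) (a := 0) (g := id))
    rw [hfold, List.append_nil, ← List.sum_reverse_int,
        List.reverse_zipWith hlen.symm, List.reverse_reverse, pvSum_zip_mins]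
    exact zero_add _
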